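-- pv_equiv track=rewrite | github.com/ofaronbiKsu/lab | File_analyzer.py | extract_next_word
-- ===== SOURCE A (Python) =====
-- def extract_next_word(text):  # Extracts the next word after 'the'.
--     words = text.split()
--     # Get the index of 'the' in the text file then return it as a list.
--     the_word = [i for i, word in enumerate(words) if word.lower() == 'the']
--     extracted_word = []
--     for index in the_word:  # Loop through the index and save the next word after the index.
--         if index + 1 < len(words):
--             extracted_word.append(words[index + 1])
--
--     return extracted_word
-- ===== SOURCE B (Python) =====
-- def extract_next_word(text):
--     words = text.split()
--     return [nxt for prev, nxt in zip(words, words[1:]) if prev.lower() == 'the']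
-- ===== Notes on version B (the rewrite author's own statement) =====
-- stated objective: idiomatic
-- what changed: Replaces the two-phase index collection (enumerate to build a list of positions of 'the', then a second loop with a bounds check indexing back into the word list) by a single comprehension over adjacent word pairs zip(words, words[1:]), which needs no indices or bounds check.
import Mathlib
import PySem

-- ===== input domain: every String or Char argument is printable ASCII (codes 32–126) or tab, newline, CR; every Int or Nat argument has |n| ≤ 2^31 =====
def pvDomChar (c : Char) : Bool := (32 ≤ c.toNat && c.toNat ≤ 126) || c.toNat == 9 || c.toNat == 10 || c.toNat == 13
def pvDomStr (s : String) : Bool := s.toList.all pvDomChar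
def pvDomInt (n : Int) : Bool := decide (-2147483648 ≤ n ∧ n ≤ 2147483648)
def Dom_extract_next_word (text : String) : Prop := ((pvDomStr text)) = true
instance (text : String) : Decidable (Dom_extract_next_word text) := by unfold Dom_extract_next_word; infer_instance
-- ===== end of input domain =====

-- B replaces A's two-phase index collection (positions of 'the', then a bounds-checked
-- indexing loop) by one comprehension over adjacent word pairs; same result, idiomatic.

-- ===== PORT A =====
def extract_next_word (text : String) : List String :=
  let words := PySem.Str.split₀ text
  let the_word := ((PySem.List.enumerate words).filter
    (fun p => PySem.Str.lower p.2 == "the")).map (fun p => p.1)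
  the_word.foldl (fun acc index =>
    if index + 1 < (words.length : Int) then
      acc ++ [PySem.List.pyGetD words (index + 1) ""]
    else acc) []

-- ===== PORT B =====
def extract_next_word_alt (text : String) : List String :=
  let words := PySem.Str.split₀ text
  (words.zip words.tail).filterMap
    (fun p => if PySem.Str.lower p.1 == "the" then some p.2 else none)

-- ===== PRECONDITION & SPEC =====
def Spec_extract_next_word (text : String) (out : List String) : Prop := out = extract_next_word_alt text
instance (text : String) (out : List String) : Decidable (Spec_extract_next_word text out) := by unfold Spec_extract_next_word; infer_instance

-- ===== CLAIM (what is proved, stated in full; the proofs are below) =====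
def Claim_equal_extract_next_word : Prop := ∀ (text : String), Dom_extract_next_word text → Spec_extract_next_word text (extract_next_word text)

-- ===== LEMMAS AND PROOFS =====

-- A's loop over the suffix `suf` of the word list, with `pre` the already-consumed prefix,
-- equals B's pair scan of `suf`.
theorem pv_core (suf : List String) : ∀ (pre : List String) (acc0 : List String),
    (((PySem.List.enumerate suf (pre.length : Int)).filter
        (fun p => PySem.Str.lower p.2 == "the")).map (fun p => p.1)).foldl
      (fun acc index =>
        if index + 1 < (((pre ++ suf).length : Nat) : Int) then
          acc ++ [PySem.List.pyGetD (pre ++ suf) (index + 1) ""]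
        else acc) acc0
    = acc0 ++ (suf.zip suf.tail).filterMap
        (fun p => if PySem.Str.lower p.1 == "the" then some p.2 else none) := by
  induction suf with
  | nil => intro pre acc0; simp [PySem.List.enumerate]
  | cons w suf' ih =>
    intro pre acc0
    have hsplit : pre ++ w :: suf' = (pre ++ [w]) ++ suf' := by simp
    have hlen : ((pre ++ [w]).length : Int) = (pre.length : Int) + 1 := by simp
    rw [PySem.List.enumerate_cons]
    by_cases hw : PySem.Str.lower w = "the"
    · have hwb : (PySem.Str.lower w == "the") = true := by simp [hw]
      cases suf' with
      | nil =>
        simp only [List.filter_cons, hwb, if_pos, List.map_cons, List.foldl_cons]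
        have hcond : ¬ ((pre.length : Int) + 1 < (((pre ++ [w]).length : Nat) : Int)) := by
          simp
        rw [if_neg hcond]
        simp [PySem.List.enumerate]
      | cons v rest =>
        simp only [List.filter_cons, hwb, if_pos, List.map_cons, List.foldl_cons]
        have hcond : (pre.length : Int) + 1 < (((pre ++ w :: v :: rest).length : Nat) : Int) := by
          simp
        rw [if_pos hcond]
        have hget : PySem.List.pyGetD (pre ++ w :: v :: rest) ((pre.length : Int) + 1) "" = v := by
          have h1 : ((pre.length : Int) + 1) = (((pre.length + 1 : Nat)) : Int) := by push_cast; ring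
          rw [h1, PySem.List.pyGetD_natCast, hsplit]
          rw [show pre.length + 1 = (pre ++ [w]).length by simp]
          simp [List.getD]
        rw [hget]
        have hih := ih (pre ++ [w]) (acc0 ++ [v])
        rw [hlen] at hih
        simp only [hsplit]
        rw [hih]
        simp [hw]
    · have hwb : (PySem.Str.lower w == "the") = false := by simp [hw]
      cases suf' with
      | nil =>
        simp [hwb, PySem.List.enumerate]
      | cons v rest =>
        simp only [List.filter_cons, hwb, Bool.false_eq_true, if_false]
        have hih := ih (pre ++ [w]) acc0
        rw [hlen] at hih
        simp only [hsplit]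
        rw [hih]
        simp [hw]

-- ===== VERDICT (by name: the statement is the Claim_ definition above) =====
theorem extract_next_word_spec : Claim_equal_extract_next_word := by
  intro text _
  unfold Spec_extract_next_word extract_next_word extract_next_word_alt
  have := pv_core (PySem.Str.split₀ text) [] []
  simpa using this
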